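-- pv_equiv track=rewrite | github.com/data-challengers/DC4 | scripts/utils.py | classify_ip
-- ===== SOURCE A (Python) =====
-- def classify_ip(ip):
--     ip = ip.split(".")
--     c = str(None)
--     if len(ip) == 4:
--         ip = [int(ip[i]) for i in range(len(ip))]
--         if ip[0] == 172:
--             if ip[2] == 0:
--                 if (ip[1] == 23 or ip[1] == 25) and ip[3] == 1:
--                     c = "Firewall"
--                 elif (ip[1] == 23 and ip[3] == 2):
--                     c = "Log Server"
--                 elif (ip[1] == 23 and ip[3] == 10):
--                     c = "Domain controller/DNS"
--                 elif ip[1] == 23: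
--                     c = "Workstation"
--             elif ip[1] == 23:
--                 if (214 <= ip[2] <= 229):
--                     c = "BoM Financial Server"
--                 else:
--                     c = "Workstation"
--         elif ip[0] == 10:
--             if ip[1] == 32:
--                 if ip[2] == 0 and (ip[3] == 1 or ip[3] == 100):
--                     c = "Firewall"
--                 elif (ip[2] == 0 and (201 <= ip[3] <= 210)):
--                     c = "Website"
--                 elif (ip[2] == 1 and (ip[3] == 100 or (201 <= ip[3] <= 206))):
--                     c = "Website"
--                 elif (ip[2] == 5 and (1 <= ip[3] <= 254)):
--                     c = "Website"
--             elif (ip[1] == 99 and ip[2] == 99 and ip[3] == 1):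
--                 c = "Snort Detection"
--     return c
-- ===== SOURCE B (Python) =====
-- RULES = [
--     (lambda o: o[0] == 172 and o[2] == 0 and o[1] in (23, 25) and o[3] == 1, "Firewall"),
--     (lambda o: o[0] == 172 and o[2] == 0 and o[1] == 23 and o[3] == 2, "Log Server"),
--     (lambda o: o[0] == 172 and o[2] == 0 and o[1] == 23 and o[3] == 10, "Domain controller/DNS"),
--     (lambda o: o[0] == 172 and o[2] == 0 and o[1] == 23, "Workstation"),
--     (lambda o: o[0] == 172 and o[1] == 23 and 214 <= o[2] <= 229, "BoM Financial Server"),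
--     (lambda o: o[0] == 172 and o[1] == 23, "Workstation"),
--     (lambda o: o[0] == 10 and o[1] == 32 and o[2] == 0 and o[3] in (1, 100), "Firewall"),
--     (lambda o: o[0] == 10 and o[1] == 32 and o[2] == 0 and 201 <= o[3] <= 210, "Website"),
--     (lambda o: o[0] == 10 and o[1] == 32 and o[2] == 1 and (o[3] == 100 or 201 <= o[3] <= 206), "Website"),
--     (lambda o: o[0] == 10 and o[1] == 32 and o[2] == 5 and 1 <= o[3] <= 254, "Website"),
--     (lambda o: o[0] == 10 and o[1] == 99 and o[2] == 99 and o[3] == 1, "Snort Detection"),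
-- ]
--
--
-- def classify_ip(ip):
--     parts = ip.split(".")
--     if len(parts) != 4:
--         return "None"
--     octets = [int(p) for p in parts]
--     return next((label for pred, label in RULES if pred(octets)), "None")
-- ===== Notes on version B (the rewrite author's own statement) =====
-- stated objective: alternative
-- what changed: Replaces A's nested if/elif cascade with a single parse step followed by a flat first-match scan over an explicit (predicate, label) rule table.
import Mathlib
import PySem

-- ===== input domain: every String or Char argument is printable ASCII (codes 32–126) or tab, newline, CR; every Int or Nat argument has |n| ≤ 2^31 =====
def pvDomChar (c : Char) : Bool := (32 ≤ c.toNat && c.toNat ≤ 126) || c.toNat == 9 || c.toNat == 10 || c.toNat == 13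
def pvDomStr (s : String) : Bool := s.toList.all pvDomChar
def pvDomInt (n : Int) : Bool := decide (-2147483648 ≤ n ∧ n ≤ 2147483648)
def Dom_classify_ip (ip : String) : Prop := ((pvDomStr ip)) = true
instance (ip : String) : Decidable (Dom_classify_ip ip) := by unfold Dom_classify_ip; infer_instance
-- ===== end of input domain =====

-- B replaces A's nested conditional cascade by a flat first-match scan over an explicit rule table (objective: alternative decomposition).

-- ===== PORT A =====
-- Literal transliteration of A: split, then the nested if-cascade assigning c.
-- ip.split(".") = (split? ip ".").getD [] (split? is none only for an empty separator).
-- The `none` branch of the comprehension is Python's ValueError (int(p) fails), excluded by Pre_.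
def classify_ip (ip : String) : String :=
  let parts := (PySem.Str.split? ip ".").getD []
  let c := "None"
  if parts.length = 4 then
    match (PySem.List.pyRange 0 (parts.length : Int) 1).mapM
        (fun i => PySem.Int.ofStr? (PySem.List.pyGetD parts i "")) with
    | none => c   -- ValueError: unreachable under Pre_classify_ip
    | some nums =>
      let a := PySem.List.pyGetD nums 0 0
      let b := PySem.List.pyGetD nums 1 0
      let c2 := PySem.List.pyGetD nums 2 0
      let d := PySem.List.pyGetD nums 3 0
      if a = 172 then
        if c2 = 0 then
          if (b = 23 ∨ b = 25) ∧ d = 1 then "Firewall"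
          else if b = 23 ∧ d = 2 then "Log Server"
          else if b = 23 ∧ d = 10 then "Domain controller/DNS"
          else if b = 23 then "Workstation"
          else c
        else if b = 23 then
          if 214 ≤ c2 ∧ c2 ≤ 229 then "BoM Financial Server"
          else "Workstation"
        else c
      else if a = 10 then
        if b = 32 then
          if c2 = 0 ∧ (d = 1 ∨ d = 100) then "Firewall"
          else if c2 = 0 ∧ (201 ≤ d ∧ d ≤ 210) then "Website"
          else if c2 = 1 ∧ (d = 100 ∨ (201 ≤ d ∧ d ≤ 206)) then "Website"
          else if c2 = 5 ∧ (1 ≤ d ∧ d ≤ 254) then "Website"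
          else c
        else if b = 99 ∧ c2 = 99 ∧ d = 1 then "Snort Detection"
        else c
      else c
  else c

-- ===== PORT B =====
-- The rule table of Source B: (predicate over the four octets, label), first match wins.
def pvRules : List ((Int × Int × Int × Int → Bool) × String) :=
  [ (fun o => decide (o.1 = 172 ∧ o.2.2.1 = 0 ∧ (o.2.1 = 23 ∨ o.2.1 = 25) ∧ o.2.2.2 = 1), "Firewall"),
    (fun o => decide (o.1 = 172 ∧ o.2.2.1 = 0 ∧ o.2.1 = 23 ∧ o.2.2.2 = 2), "Log Server"),
    (fun o => decide (o.1 = 172 ∧ o.2.2.1 = 0 ∧ o.2.1 = 23 ∧ o.2.2.2 = 10), "Domain controller/DNS"),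
    (fun o => decide (o.1 = 172 ∧ o.2.2.1 = 0 ∧ o.2.1 = 23), "Workstation"),
    (fun o => decide (o.1 = 172 ∧ o.2.1 = 23 ∧ 214 ≤ o.2.2.1 ∧ o.2.2.1 ≤ 229), "BoM Financial Server"),
    (fun o => decide (o.1 = 172 ∧ o.2.1 = 23), "Workstation"),
    (fun o => decide (o.1 = 10 ∧ o.2.1 = 32 ∧ o.2.2.1 = 0 ∧ (o.2.2.2 = 1 ∨ o.2.2.2 = 100)), "Firewall"),
    (fun o => decide (o.1 = 10 ∧ o.2.1 = 32 ∧ o.2.2.1 = 0 ∧ 201 ≤ o.2.2.2 ∧ o.2.2.2 ≤ 210), "Website"),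
    (fun o => decide (o.1 = 10 ∧ o.2.1 = 32 ∧ o.2.2.1 = 1 ∧ (o.2.2.2 = 100 ∨ 201 ≤ o.2.2.2 ∧ o.2.2.2 ≤ 206)), "Website"),
    (fun o => decide (o.1 = 10 ∧ o.2.1 = 32 ∧ o.2.2.1 = 5 ∧ 1 ≤ o.2.2.2 ∧ o.2.2.2 ≤ 254), "Website"),
    (fun o => decide (o.1 = 10 ∧ o.2.1 = 99 ∧ o.2.2.1 = 99 ∧ o.2.2.2 = 1), "Snort Detection") ]

-- Port of Source B's `next((label for pred, label in RULES if pred(octets)), "None")`: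
-- first-match scan over the rule table.
def pvScan : List ((Int × Int × Int × Int → Bool) × String) → (Int × Int × Int × Int) → String
  | [], _ => "None"
  | r :: rs, o => if r.1 o then r.2 else pvScan rs o

def classify_ip_alt (ip : String) : String :=
  let parts := (PySem.Str.split? ip ".").getD []
  if parts.length ≠ 4 then "None"
  else
    match parts.mapM PySem.Int.ofStr? with
    | some [a, b, c, d] =>
        pvScan pvRules (a, b, c, d)
    | _ => "None"   -- ValueError (excluded by Pre_classify_ip) or impossible length

-- ===== PRECONDITION & SPEC =====
-- Pre_ excludes exactly the inputs on which Python A raises ValueError: a 4-part split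
-- where some part int() cannot parse (my B raises the same ValueError there).
def Pre_classify_ip (ip : String) : Prop :=
  ((PySem.Str.split? ip ".").getD []).length = 4 →
    ∀ p ∈ (PySem.Str.split? ip ".").getD [], (PySem.Int.ofStr? p).isSome
instance (ip : String) : Decidable (Pre_classify_ip ip) := by unfold Pre_classify_ip; infer_instance
def pvWitness_classify_ip : String := "172.23.0.1"

def Spec_classify_ip (ip : String) (out : String) : Prop := out = classify_ip_alt ip
instance (ip : String) (out : String) : Decidable (Spec_classify_ip ip out) := by unfold Spec_classify_ip; infer_instance

-- ===== CLAIM (what is proved, stated in full; the proofs are below) =====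
def Claim_equal_classify_ip : Prop := ∀ (ip : String), Dom_classify_ip ip → Pre_classify_ip ip → Spec_classify_ip ip (classify_ip ip)

-- ===== LEMMAS AND PROOFS =====

-- A's nested if-cascade and B's first-match rule scan agree on any four octets.
lemma pv_core (a b c2 d : Int) :
    (if a = 172 then
        if c2 = 0 then
          if (b = 23 ∨ b = 25) ∧ d = 1 then "Firewall"
          else if b = 23 ∧ d = 2 then "Log Server"
          else if b = 23 ∧ d = 10 then "Domain controller/DNS"
          else if b = 23 then "Workstation"
          else "None"
        else if b = 23 then
          if 214 ≤ c2 ∧ c2 ≤ 229 then "BoM Financial Server"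
          else "Workstation"
        else "None"
      else if a = 10 then
        if b = 32 then
          if c2 = 0 ∧ (d = 1 ∨ d = 100) then "Firewall"
          else if c2 = 0 ∧ (201 ≤ d ∧ d ≤ 210) then "Website"
          else if c2 = 1 ∧ (d = 100 ∨ (201 ≤ d ∧ d ≤ 206)) then "Website"
          else if c2 = 5 ∧ (1 ≤ d ∧ d ≤ 254) then "Website"
          else "None"
        else if b = 99 ∧ c2 = 99 ∧ d = 1 then "Snort Detection"
        else "None"
      else "None")
    = pvScan pvRules (a, b, c2, d) := by
  by_cases ha : a = 172
  · subst ha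
    by_cases hc : c2 = 0
    · subst hc
      by_cases hb : b = 23
      · subst hb
        by_cases hd1 : d = 1
        · subst hd1; decide
        · by_cases hd2 : d = 2
          · subst hd2; decide
          · by_cases hd10 : d = 10
            · subst hd10; decide
            · simp [pvScan, pvRules, hd1, hd2, hd10]
      · by_cases hb25 : b = 25
        · subst hb25
          by_cases hd1 : d = 1
          · subst hd1; decide
          · simp [pvScan, pvRules, hd1]
        · simp [pvScan, pvRules, hb, hb25]
    · by_cases hb : b = 23
      · subst hb
        by_cases hr : 214 ≤ c2 ∧ c2 ≤ 229
        · simp [pvScan, pvRules, hc, hr]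
        · simp [pvScan, pvRules, hc, hr]
      · simp [pvScan, pvRules, hc, hb]
  · by_cases ha10 : a = 10
    · subst ha10
      by_cases hb32 : b = 32
      · subst hb32
        by_cases k1 : c2 = 0 ∧ (d = 1 ∨ d = 100)
        · obtain ⟨hc, hd | hd⟩ := k1 <;> subst hc <;> subst hd <;> decide
        · by_cases k2 : c2 = 0 ∧ 201 ≤ d ∧ d ≤ 210
          · obtain ⟨hc, hd⟩ := k2
            subst hc
            have h1 : d ≠ 1 := by omega
            have h100 : d ≠ 100 := by omega
            simp [pvScan, pvRules, h1, h100, hd.1, hd.2]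
          · by_cases k3 : c2 = 1 ∧ (d = 100 ∨ 201 ≤ d ∧ d ≤ 206)
            · obtain ⟨hc, hd⟩ := k3
              subst hc
              simp [pvScan, pvRules, hd]
            · by_cases k4 : c2 = 5 ∧ 1 ≤ d ∧ d ≤ 254
              · obtain ⟨hc, hd⟩ := k4
                subst hc
                simp [pvScan, pvRules, hd]
              · simp [pvScan, pvRules, k1, k2, k3, k4]
      · by_cases k5 : b = 99 ∧ c2 = 99 ∧ d = 1
        · obtain ⟨hb, hc, hd⟩ := k5
          subst hb; subst hc; subst hd; decide
        · simp [pvScan, pvRules, hb32, k5]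
    · simp [pvScan, pvRules, ha, ha10]

-- ===== VERDICT (by name: the statement is the Claim_ definition above) =====
theorem classify_ip_spec : Claim_equal_classify_ip := by
  intro ip _ hpre
  unfold Spec_classify_ip classify_ip classify_ip_alt
  unfold Pre_classify_ip at hpre
  generalize hL : (PySem.Str.split? ip ".").getD [] = L at hpre ⊢
  by_cases hlen : L.length = 4
  · obtain ⟨s0, s1, s2, s3, rfl⟩ : ∃ s0 s1 s2 s3, L = [s0, s1, s2, s3] := by
      rcases L with _ | ⟨s0, _ | ⟨s1, _ | ⟨s2, _ | ⟨s3, _ | ⟨s4, t⟩⟩⟩⟩⟩ <;>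
        simp_all
    obtain ⟨a, ha⟩ := Option.isSome_iff_exists.mp (hpre hlen s0 (by simp))
    obtain ⟨b, hb⟩ := Option.isSome_iff_exists.mp (hpre hlen s1 (by simp))
    obtain ⟨c, hc⟩ := Option.isSome_iff_exists.mp (hpre hlen s2 (by simp))
    obtain ⟨d, hd⟩ := Option.isSome_iff_exists.mp (hpre hlen s3 (by simp))
    have h4 : ([s0, s1, s2, s3] : List String).length = 4 := rfl
    have hrange : PySem.List.pyRange 0 (((4 : Nat) : Int)) 1 = [0, 1, 2, 3] := by decide
    simp only [h4, hrange]
    simp only [List.mapM_cons, List.mapM_nil]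
    simp [PySem.List.pyGetD, PySem.List.pyGet?, PySem.List.pyIdx?, ha, hb, hc, hd,
      pv_core a b c d]
  · simp [hlen]
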